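-- pv_equiv track=rewrite | github.com/axel92xd/ayed1-2025-tps | TP8/EJ3.py | email_a_tupla
-- ===== SOURCE A (Python) =====
-- def email_a_tupla(email: str) -> tuple:
--     """
--     Convierte un string de email en una tupla de sus partes.
--
--     Pre:  Un string de email (ej: "alguien@uade.edu.ar")
--     Post: Una tupla (ej: ('alguien', 'uade', 'edu', 'ar')) o una tupla vacía si el formato es inválido.
--     """
--
--     email = email.strip() # Limpiamos espacios
--
--     # Validar que haya un solo '@'
--     if email.count('@') != 1:
--         return () # Tupla vacía si hay 0 o más de 1 arroba
--
--     # Separamos usuario y dominio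
--     try:
--         usuario, dominio_completo = email.split('@')
--     except ValueError:
--         return () # Si falla (ej: solo "@")
--
--     # Validar que no estén vacíos
--     if not usuario or not dominio_completo:
--         return () # ej: "@uade.com" o "alguien@"
--
--     # Validar que el dominio tenga al menos un punto
--     if '.' not in dominio_completo:
--         return () # ej: "alguien@servidor"
--
--     # Separamos el dominio por los puntos
--     partes_dominio = dominio_completo.split('.')
--
--     # Validar que no haya partes vacías
--     #    (ej: "alguien@uade..ar" -> split da ['uade', '', 'ar'])
--     for parte in partes_dominio:
--         if not parte:
--             return () # Tupla vacía
--
--     # Creamos la lista final y la convertimos en tupla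
--     lista_final = [usuario] + partes_dominio
--     return tuple(lista_final)
-- ===== SOURCE B (Python) =====
-- def email_a_tupla(email: str) -> tuple:
--     """One-pass state machine: scan the stripped string once, cutting parts
--     at '@' (once, before any domain dot) and at '.' (only after the '@')."""
--     parts = []
--     token = ""
--     seen_at = False
--     for ch in email.strip():
--         if ch == '@':
--             if seen_at or not token:
--                 return ()
--             parts.append(token)
--             token = ""
--             seen_at = True
--         elif ch == '.' and seen_at:
--             if not token:
--                 return ()
--             parts.append(token)
--             token = ""
--         else:
--             token += ch
--     if not seen_at or not token or len(parts) < 2: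
--         return ()
--     parts.append(token)
--     return tuple(parts)
-- ===== Notes on version B (the rewrite author's own statement) =====
-- stated objective: alternative
-- what changed: A's multi-pass pipeline (count the separator, split on it, substring search for a dot, split on dots, then a scan for empty parts) is replaced by a single one-pass state machine over the stripped string that cuts parts at the at-sign and at the dots after it and rejects as soon as a rule is violated.
import Mathlib
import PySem

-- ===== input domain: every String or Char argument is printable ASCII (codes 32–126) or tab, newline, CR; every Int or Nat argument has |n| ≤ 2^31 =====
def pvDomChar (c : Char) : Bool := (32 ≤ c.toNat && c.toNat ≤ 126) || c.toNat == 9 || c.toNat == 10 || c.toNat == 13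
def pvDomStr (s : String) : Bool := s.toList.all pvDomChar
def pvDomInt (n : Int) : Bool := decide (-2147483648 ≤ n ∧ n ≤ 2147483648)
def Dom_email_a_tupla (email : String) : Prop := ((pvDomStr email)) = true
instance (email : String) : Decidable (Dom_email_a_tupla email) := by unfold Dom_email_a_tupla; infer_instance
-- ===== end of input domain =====

-- B replaces A's count/split/re-scan pipeline by a single one-pass state machine over the
-- stripped string (objective: alternative — one traversal instead of several, same cost class).

-- ===== PORT A =====
def email_a_tupla (email : String) : List String :=
  let e := PySem.Str.strip email
  if PySem.Str.count e "@" ≠ 1 then []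
  else
    match PySem.Str.split? e "@" with
    | some [usuario, dominio] =>
      if usuario = "" ∨ dominio = "" then []
      else if ¬ (PySem.Str.isIn "." dominio = true) then []
      else
        match PySem.Str.split? dominio "." with
        | some partes =>
          -- 'for parte in partes: if not parte: return ()' — the scan for an empty part
          if partes.any (fun p => p = "") then []
          else usuario :: partes
        | none => []
    | _ => []

-- ===== PORT B =====
-- the for-loop of Source B, with its early 'return ()' as an immediate []
def pvAltLoop (cs : List Char) (parts : List String) (token : List Char) (seenAt : Bool) :
    List String :=
  match cs with
  | [] =>
      if seenAt = false ∨ token = [] ∨ parts.length < 2 then []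
      else parts ++ [String.ofList token]
  | c :: rest =>
      if c = '@' then
        if seenAt = true ∨ token = [] then []
        else pvAltLoop rest (parts ++ [String.ofList token]) [] true
      else if c = '.' ∧ seenAt = true then
        if token = [] then []
        else pvAltLoop rest (parts ++ [String.ofList token]) [] seenAt
      else pvAltLoop rest parts (token ++ [c]) seenAt

def email_a_tupla_alt (email : String) : List String :=
  pvAltLoop (PySem.Str.strip email).toList [] [] false

-- ===== PRECONDITION & SPEC =====
def Spec_email_a_tupla (email : String) (out : List String) : Prop := out = email_a_tupla_alt email
instance (email : String) (out : List String) : Decidable (Spec_email_a_tupla email out) := by unfold Spec_email_a_tupla; infer_instance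

-- ===== CLAIM (what is proved, stated in full; the proofs are below) =====
def Claim_equal_email_a_tupla : Prop := ∀ (email : String), Dom_email_a_tupla email → Spec_email_a_tupla email (email_a_tupla email)

-- ===== LEMMAS AND PROOFS =====

-- splitting a char list on a single separator character, recursively
def pvSplit1 (sep : Char) : List Char → List (List Char)
  | [] => [[]]
  | c :: cs => if c = sep then [] :: pvSplit1 sep cs
               else (pvSplit1 sep cs).modifyHead (c :: ·)

theorem pvSplit1_ne_nil (sep : Char) (l : List Char) : pvSplit1 sep l ≠ [] := by
  induction l with
  | nil => simp [pvSplit1]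
  | cons c cs ih =>
    simp only [pvSplit1]
    split_ifs
    · simp
    · cases h : pvSplit1 sep cs with
      | nil => exact absurd h ih
      | cons x xs => simp [List.modifyHead]

theorem pvSplitOn_go_eq (sep : Char) (fuel : Nat) (l cur : List Char) (acc : List (List Char))
    (h : l.length ≤ fuel) :
    PySem.Chars.splitOn.go [sep] fuel l cur acc =
      acc.reverse ++ (pvSplit1 sep l).modifyHead (cur.reverse ++ ·) := by
  induction fuel generalizing l cur acc with
  | zero =>
    interval_cases hl : l.length
    · have : l = [] := List.length_eq_zero_iff.mp hl
      subst this
      simp [PySem.Chars.splitOn.go, pvSplit1, List.modifyHead]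
  | succ fuel ih =>
    cases l with
    | nil => simp [PySem.Chars.splitOn.go, pvSplit1, List.modifyHead]
    | cons c rest =>
      by_cases hc : c = sep
      · subst hc
        have hpre : List.isPrefixOf [c] (c :: rest) = true := by
          simp [List.isPrefixOf]
        rw [PySem.Chars.splitOn.go]
        simp only [hpre, if_true, List.length_singleton, List.drop_succ_cons, List.drop_zero]
        rw [ih rest [] (List.reverse cur :: acc) (by simpa using Nat.le_of_succ_le_succ (by simpa using h))]
        simp [pvSplit1]
        cases h2 : pvSplit1 c rest <;> simp [h2]
      · have hpre : List.isPrefixOf [sep] (c :: rest) = false := by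
          simp [List.isPrefixOf, beq_iff_eq]
          intro hh; exact hc hh.symm
        rw [PySem.Chars.splitOn.go]
        simp only [hpre, Bool.false_eq_true, if_false]
        rw [ih rest (c :: cur) acc (by simpa using Nat.le_of_succ_le_succ (by simpa using h))]
        simp only [pvSplit1, if_neg hc]
        congr 1
        cases hS : pvSplit1 sep rest with
        | nil => exact absurd hS (pvSplit1_ne_nil sep rest)
        | cons x xs => simp [List.modifyHead]

theorem pvSplitOn_single (sep : Char) (l : List Char) :
    PySem.Chars.splitOn l [sep] = pvSplit1 sep l := by
  unfold PySem.Chars.splitOn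
  rw [pvSplitOn_go_eq sep (l.length + 1) l [] [] (by omega)]
  cases hS : pvSplit1 sep l with
  | nil => exact absurd hS (pvSplit1_ne_nil sep l)
  | cons x xs => simp [List.modifyHead]

theorem pvCount_go_eq (a : Char) (fuel : Nat) (l : List Char) (acc : Nat)
    (h : l.length ≤ fuel) :
    PySem.Chars.count.go [a] fuel l acc = acc + l.count a := by
  induction fuel generalizing l acc with
  | zero =>
    have : l = [] := List.length_eq_zero_iff.mp (Nat.le_zero.mp h)
    subst this
    simp [PySem.Chars.count.go]
  | succ fuel ih =>
    cases l with
    | nil => simp [PySem.Chars.count.go]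
    | cons c rest =>
      by_cases hc : c = a
      · subst hc
        have hpre : List.isPrefixOf [c] (c :: rest) = true := by simp [List.isPrefixOf]
        rw [PySem.Chars.count.go]
        simp only [hpre, if_true, List.length_singleton, List.drop_succ_cons, List.drop_zero]
        rw [ih rest (acc + 1) (by simpa using Nat.le_of_succ_le_succ (by simpa using h))]
        simp [List.count_cons]
        omega
      · have hpre : List.isPrefixOf [a] (c :: rest) = false := by
          simp [List.isPrefixOf, beq_iff_eq]
          intro hh; exact hc hh.symm
        rw [PySem.Chars.count.go]
        simp only [hpre, Bool.false_eq_true, if_false]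
        rw [ih rest acc (by simpa using Nat.le_of_succ_le_succ (by simpa using h))]
        simp [List.count_cons, hc]

theorem pvCount_single (a : Char) (l : List Char) :
    PySem.Chars.count l [a] = l.count a := by
  unfold PySem.Chars.count
  simp only [List.isEmpty_cons, Bool.false_eq_true, if_false]
  simpa using pvCount_go_eq a l.length l 0 (le_refl _)

theorem pvSplit1_length (sep : Char) (l : List Char) :
    (pvSplit1 sep l).length = l.count sep + 1 := by
  induction l with
  | nil => simp [pvSplit1]
  | cons c cs ih =>
    by_cases hc : c = sep
    · subst hc; simp [pvSplit1, List.count_cons, ih]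
    · simp [pvSplit1, hc, List.count_cons, ih]

theorem pvSplit1_append_no_sep (sep : Char) (u rest : List Char) (h : sep ∉ u) :
    pvSplit1 sep (u ++ rest) = (pvSplit1 sep rest).modifyHead (u ++ ·) := by
  induction u with
  | nil =>
    cases hS : pvSplit1 sep rest with
    | nil => exact absurd hS (pvSplit1_ne_nil sep rest)
    | cons x xs => simp [hS, List.modifyHead]
  | cons c u ih =>
    have hc : c ≠ sep := by intro hh; exact h (by simp [hh])
    simp only [List.cons_append, pvSplit1, if_neg hc]
    rw [ih (by intro hh; exact h (by simp [hh]))]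
    cases hS : pvSplit1 sep rest with
    | nil => exact absurd hS (pvSplit1_ne_nil sep rest)
    | cons x xs => simp [List.modifyHead]

theorem pvSplit1_no_sep (sep : Char) (u : List Char) (h : sep ∉ u) :
    pvSplit1 sep u = [u] := by
  have := pvSplit1_append_no_sep sep u [] h
  simpa [pvSplit1, List.modifyHead] using this

-- B's loop before any '@' has been seen, on a chunk with no '@': never accepts
theorem pvAltLoop_noAt (u : List Char) (parts : List String) (token : List Char)
    (h : '@' ∉ u) : pvAltLoop u parts token false = [] := by
  induction u generalizing parts token with
  | nil => simp [pvAltLoop]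
  | cons c u ih =>
    have hc : ¬ c = '@' := by intro hh; exact h (by simp [hh])
    simp only [pvAltLoop, if_neg hc]
    have : ¬ (c = '.' ∧ false = true) := by simp
    rw [if_neg this]
    exact ih _ _ (by intro hh; exact h (by simp [hh]))

-- B's loop up to and through the first '@'
theorem pvAltLoop_preAt (u d : List Char) (parts : List String) (token : List Char)
    (h : '@' ∉ u) :
    pvAltLoop (u ++ '@' :: d) parts token false =
      if token ++ u = [] then []
      else pvAltLoop d (parts ++ [String.ofList (token ++ u)]) [] true := by
  induction u generalizing token with
  | nil => simp [pvAltLoop]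
  | cons c u ih =>
    have hc : ¬ c = '@' := by intro hh; exact h (by simp [hh])
    simp only [List.cons_append, pvAltLoop, if_neg hc]
    have : ¬ (c = '.' ∧ false = true) := by simp
    rw [if_neg this]
    rw [ih _ (by intro hh; exact h (by simp [hh]))]
    simp

-- B's loop after the '@', meeting a second '@': rejects
theorem pvAltLoop_atPost (d : List Char) (parts : List String) (token : List Char)
    (h : '@' ∈ d) : pvAltLoop d parts token true = [] := by
  induction d generalizing parts token with
  | nil => simp at h
  | cons c d ih =>
    by_cases hc : c = '@'
    · subst hc; simp [pvAltLoop]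
    · have hd : '@' ∈ d := by
        rcases List.mem_cons.mp h with h1 | h1
        · exact absurd h1.symm hc
        · exact h1
      simp only [pvAltLoop, if_neg hc]
      by_cases hdot : c = '.'
      · rw [if_pos (by simp [hdot])]
        split_ifs
        · rfl
        · exact ih _ _ hd
      · rw [if_neg (by simp [hdot])]
        exact ih _ _ hd

-- B's loop after the '@', on a domain chunk with no further '@': it computes the
-- '.'-split of token ++ d and applies the final checks
theorem pvAltLoop_postAt (d : List Char) (parts : List String) (token : List Char)
    (hd : '@' ∉ d) (ht : '.' ∉ token) :
    pvAltLoop d parts token true =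
      if ([] ∈ pvSplit1 '.' (token ++ d)) ∨
          parts.length + (pvSplit1 '.' (token ++ d)).length < 3 then []
      else parts ++ (pvSplit1 '.' (token ++ d)).map String.ofList := by
  induction d generalizing parts token with
  | nil =>
    rw [pvSplit1_no_sep '.' (token ++ []) (by simpa using ht)]
    simp only [pvAltLoop]
    by_cases htok : token = []
    · subst htok; simp
    · by_cases hp : parts.length < 2
      · rw [if_pos (by simp [hp]), if_pos (by right; simp; omega)]
      · rw [if_neg (by simp [htok, hp]), if_neg (by simp [htok]; omega)]
        simp
  | cons c d ih =>
    by_cases hc : c = '@'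
    · exact absurd (by simp [hc]) hd
    · by_cases hdot : c = '.'
      · subst hdot
        have hsplit : pvSplit1 '.' (token ++ '.' :: d) = token :: pvSplit1 '.' d := by
          rw [pvSplit1_append_no_sep '.' token ('.' :: d) ht]
          simp [pvSplit1, List.modifyHead]
        simp only [pvAltLoop, if_neg hc]
        rw [if_pos (by simp)]
        rw [hsplit]
        by_cases htok : token = []
        · subst htok; simp
        · rw [if_neg htok]
          rw [ih _ [] (by intro hh; exact hd (by simp [hh])) (by simp)]
          simp only [List.nil_append, List.mem_cons, List.length_cons, List.length_append,
            List.length_singleton, List.map_cons]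
          have : ¬ [] = token := fun hh => htok hh.symm
          simp only [this, false_or, List.length_nil]
          have harith : parts.length + (0 + 1) + (pvSplit1 '.' d).length
                = parts.length + ((pvSplit1 '.' d).length + 1) := by omega
          simp only [harith]
          simp
      · simp only [pvAltLoop, if_neg hc]
        rw [if_neg (by simp [hdot])]
        rw [ih parts (token ++ [c]) (by intro hh; exact hd (by simp [hh]))
            (by simp [ht]; intro hh; exact hdot hh.symm)]
        simp

-- first-occurrence decomposition
theorem pvFirstSplit (a : Char) (l : List Char) (h : a ∈ l) :
    ∃ s t, l = s ++ a :: t ∧ a ∉ s := by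
  induction l with
  | nil => simp at h
  | cons c cs ih =>
    by_cases hc : c = a
    · exact ⟨[], cs, by simp [hc], by simp⟩
    · rcases List.mem_cons.mp h with h1 | h1
      · exact absurd h1.symm hc
      · obtain ⟨s, t, hst, hns⟩ := ih h1
        exact ⟨c :: s, t, by simp [hst], by simp [hns]; intro hh; exact hc hh.symm⟩

-- the core fact: A's pipeline equals B's single pass
theorem pvMain (email : String) :
    email_a_tupla email = pvAltLoop (PySem.Str.strip email).toList [] [] false := by
  unfold email_a_tupla
  have hat : ("@" : String).toList = ['@'] := rfl
  have hdt : ("." : String).toList = ['.'] := rfl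
  simp only [PySem.Str.count_eq, PySem.Str.split?, PySem.Chars.split?, PySem.Str.isIn_eq,
    hat, hdt, List.isEmpty_cons, Bool.false_eq_true, if_false, Option.map_some]
  generalize (PySem.Str.strip email).toList = cs

  rw [pvCount_single]
  by_cases h1 : cs.count '@' = 1
  · have hmem : '@' ∈ cs := List.count_pos_iff.mp (by omega)
    obtain ⟨u, d, hcs, hu⟩ := pvFirstSplit '@' cs hmem
    subst hcs
    have hcu : u.count '@' = 0 := List.count_eq_zero.mpr hu
    have hcd : d.count '@' = 0 := by
      simp [List.count_append, List.count_cons, hcu] at h1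
      omega
    have hd : '@' ∉ d := List.count_eq_zero.mp hcd
    rw [if_neg (by simp [h1])]
    have hsp : PySem.Chars.splitOn (u ++ '@' :: d) ['@'] = [u, d] := by
      rw [pvSplitOn_single, pvSplit1_append_no_sep '@' u _ hu]
      have : pvSplit1 '@' ('@' :: d) = [] :: pvSplit1 '@' d := by simp [pvSplit1]
      rw [this, pvSplit1_no_sep '@' d hd]
      simp [List.modifyHead]
    rw [hsp]
    rw [pvAltLoop_preAt u d [] [] hu]
    simp only [List.nil_append, List.map_cons, List.map_nil]
    by_cases hu0 : u = []
    · subst hu0; simp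
    · rw [if_neg hu0]
      rw [pvAltLoop_postAt d [String.ofList u] [] hd (by simp)]
      by_cases hd0 : d = []
      · subst hd0
        rw [if_pos (by simp), if_pos (by left; simp [pvSplit1])]
      · rw [if_neg (by simp [hu0, hd0])]
        simp only [List.nil_append, String.toList_ofList, List.length_singleton]
        rw [pvSplitOn_single '.' d]
        by_cases hdot : '.' ∈ d
        · have hlen : 2 ≤ (pvSplit1 '.' d).length := by
            rw [pvSplit1_length]
            have : 0 < d.count '.' := List.count_pos_iff.mpr hdot
            omega
          rw [if_neg (by
            rw [PySem.Chars.isIn_iff_infix]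
            simp [List.singleton_infix_iff, hdot])]
          by_cases hemp : [] ∈ pvSplit1 '.' d
          · rw [if_pos (by
              simp only [List.any_eq_true]
              exact ⟨String.ofList [], List.mem_map_of_mem hemp, by simp⟩)]
            rw [if_pos (Or.inl hemp)]
          · rw [if_neg (by
              simp only [List.any_eq_true, not_exists]
              rintro p ⟨hp, hpe⟩
              simp only [List.mem_map] at hp
              obtain ⟨x, hx, rfl⟩ := hp
              simp only [decide_eq_true_eq, String.ofList_eq_empty_iff] at hpe
              subst hpe
              exact hemp hx)]
            rw [if_neg (by
              push_neg
              exact ⟨hemp, by omega⟩)]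
            simp
        · rw [if_pos (by
            rw [Bool.not_eq_true, ← Bool.not_eq_true, PySem.Chars.isIn_iff_infix]
            simp [List.singleton_infix_iff, hdot])]
          have hlen : (pvSplit1 '.' d).length = 1 := by
            rw [pvSplit1_length, List.count_eq_zero.mpr hdot]
          rw [if_pos (by omega)]
  · rw [if_pos (by simp [h1])]
    by_cases hz : cs.count '@' = 0
    · exact (pvAltLoop_noAt cs [] [] (List.count_eq_zero.mp hz)).symm
    · have hmem : '@' ∈ cs := List.count_pos_iff.mp (by omega)
      obtain ⟨u, d, hcs, hu⟩ := pvFirstSplit '@' cs hmem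
      subst hcs
      have hcu : u.count '@' = 0 := List.count_eq_zero.mpr hu
      have hd : '@' ∈ d := by
        by_contra hnd
        have : d.count '@' = 0 := List.count_eq_zero.mpr hnd
        simp [List.count_append, List.count_cons, hcu, this] at h1 hz
      rw [pvAltLoop_preAt u d [] [] hu]
      simp only [List.nil_append]
      split_ifs
      · rfl
      · rw [pvAltLoop_atPost d _ [] hd]

-- ===== VERDICT (by name: the statement is the Claim_ definition above) =====
theorem email_a_tupla_spec : Claim_equal_email_a_tupla := by
  intro email _
  show email_a_tupla email = email_a_tupla_alt email
  rw [pvMain]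
  rfl
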